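-- pv_equiv track=rewrite | github.com/vincentm65/vmCode-CLI | src/utils/safe_commands.py | _matches_safe_subcommand
-- ===== SOURCE A (Python) =====
-- def _matches_safe_subcommand(arg: str, safe_set: frozenset) -> bool:
--     """Check if an argument matches any entry in the safe subcommand set.
--
--     Uses longest-prefix matching for flag-style arguments:
--     e.g., if '-Qi' is safe, then '-Qil' also matches.
--     For word-style subcommands (e.g., git 'status'), exact match only.
--
--     Comparison is case-insensitive.
--     """
--     arg_lower = arg.lower()
--
--     # Build lowercase version of safe_set for case-insensitive comparison
--     safe_lower = {s.lower() for s in safe_set}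
--
--     # Exact match
--     if arg_lower in safe_lower:
--         return True
--
--     # Longest-prefix match for flags (arguments starting with -)
--     if arg_lower.startswith("-"):
--         # Try progressively shorter prefixes
--         for length in range(len(arg_lower) - 1, 1, -1):
--             prefix = arg_lower[:length]
--             if prefix in safe_lower:
--                 return True
--
--     return False
-- ===== SOURCE B (Python) =====
-- def _matches_safe_subcommand(arg: str, safe_set: frozenset) -> bool:
--     """Scan the safe entries once: exact match, or (for flags) a proper
--     startswith-prefix of length >= 2 — no prefix slicing or set building."""
--     arg_lower = arg.lower()
--     is_flag = arg_lower.startswith("-")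
--     for s in safe_set:
--         sl = s.lower()
--         if arg_lower == sl:
--             return True
--         if is_flag and 2 <= len(sl) < len(arg_lower) and arg_lower.startswith(sl):
--             return True
--     return False
-- ===== Notes on version B (the rewrite author's own statement) =====
-- stated objective: idiomatic
-- what changed: A builds a lowercased set and hash-probes every shorter prefix slice of the argument; B does no slicing and builds no set: it scans the safe entries once, testing each lowercased entry for equality or (for flag arguments) a bounded startswith proper-prefix match.
import Mathlib
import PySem

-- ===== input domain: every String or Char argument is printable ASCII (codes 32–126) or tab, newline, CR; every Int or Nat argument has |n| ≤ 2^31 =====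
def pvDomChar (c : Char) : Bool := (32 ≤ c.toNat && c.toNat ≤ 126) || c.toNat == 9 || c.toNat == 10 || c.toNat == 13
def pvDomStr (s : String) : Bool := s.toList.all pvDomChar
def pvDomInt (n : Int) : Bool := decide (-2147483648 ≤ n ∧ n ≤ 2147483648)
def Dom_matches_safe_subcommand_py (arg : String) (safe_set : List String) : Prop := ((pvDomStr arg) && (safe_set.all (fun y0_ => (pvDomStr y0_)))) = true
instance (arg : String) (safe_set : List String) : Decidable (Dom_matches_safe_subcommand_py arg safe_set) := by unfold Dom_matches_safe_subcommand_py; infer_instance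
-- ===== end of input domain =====

-- B replaces A's lowered-set build plus per-prefix slicing/hash-probing by a single scan
-- over the safe entries with an equality / bounded-startswith test (idiomatic; same cost class).


-- ===== PORT A =====
def matches_safe_subcommand_py (arg : String) (safe_set : List String) : Bool :=
  let argLower := PySem.Str.lower arg
  let safeLower : PySem.Set String := PySem.Set.ofList (safe_set.map PySem.Str.lower)
  if argLower ∈ safeLower then true
  else if PySem.Str.startswith argLower "-" then
    -- for length in range(len(arg_lower) - 1, 1, -1): if arg_lower[:length] in safe_lower: return True
    (PySem.List.pyRange ((PySem.Str.len argLower : Int) - 1) 1 (-1)).foldl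
      (fun acc length =>
        acc || decide (PySem.Str.slice argLower none (some length) ∈ safeLower)) false
  else false

-- ===== PORT B =====
def matches_safe_subcommand_py_alt (arg : String) (safe_set : List String) : Bool :=
  let argLower := PySem.Str.lower arg
  let isFlag := PySem.Str.startswith argLower "-"
  safe_set.any (fun s =>
    let sl := PySem.Str.lower s
    argLower == sl ||
      (isFlag && decide (2 ≤ PySem.Str.len sl) &&
       decide (PySem.Str.len sl < PySem.Str.len argLower) &&
       PySem.Str.startswith argLower sl))

-- ===== PRECONDITION & SPEC =====
def Spec_matches_safe_subcommand_py (arg : String) (safe_set : List String) (out : Bool) : Prop := out = matches_safe_subcommand_py_alt arg safe_set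
instance (arg : String) (safe_set : List String) (out : Bool) : Decidable (Spec_matches_safe_subcommand_py arg safe_set out) := by unfold Spec_matches_safe_subcommand_py; infer_instance

-- ===== CLAIM (what is proved, stated in full; the proofs are below) =====
def Claim_equal_matches_safe_subcommand_py : Prop := ∀ (arg : String) (safe_set : List String), Dom_matches_safe_subcommand_py arg safe_set → Spec_matches_safe_subcommand_py arg safe_set (matches_safe_subcommand_py arg safe_set)

-- ===== LEMMAS AND PROOFS =====

-- A's foldl-with-or over the prefix lengths is an `any` over the same range.
theorem pvFoldlOrEqAny (xs : List Int) (p : Int → Bool) (acc : Bool) :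
    xs.foldl (fun a x => a || p x) acc = (acc || xs.any p) := by
  induction xs generalizing acc with
  | nil => simp
  | cons x xs ih => simp [List.foldl_cons, ih, Bool.or_assoc]

-- An Int length in (1, |al|-1] with take = sl is the same as: sl a prefix of al, 2 ≤ |sl| < |al|.
theorem pvPrefixLenIff (al sl : List Char) :
    (∃ len : Int, 1 < len ∧ len ≤ (al.length : Int) - 1 ∧ al.take len.toNat = sl)
    ↔ (2 ≤ sl.length ∧ sl.length < al.length ∧ sl <+: al) := by
  constructor
  · rintro ⟨len, h1, h2, rfl⟩
    have hlt : len.toNat < al.length := by omega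
    have hlen : (al.take len.toNat).length = len.toNat := by
      simp [List.length_take]; omega
    refine ⟨by omega, by omega, List.take_prefix _ _⟩
  · rintro ⟨h1, h2, hp⟩
    refine ⟨(sl.length : Int), by omega, by omega, ?_⟩
    simp only [Int.toNat_natCast]
    exact (List.prefix_iff_eq_take.mp hp).symm

theorem pvMain : ∀ arg safe_set, matches_safe_subcommand_py arg safe_set = matches_safe_subcommand_py_alt arg safe_set := by
  intro arg safe_set
  unfold matches_safe_subcommand_py matches_safe_subcommand_py_alt
  simp only [pvFoldlOrEqAny, Bool.false_or]
  set al := PySem.Str.lower arg with hal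
  by_cases hmem : al ∈ PySem.Set.ofList (safe_set.map PySem.Str.lower)
  · simp [hmem]
    rcases (PySem.Set.mem_ofList _ _).mp hmem with h
    simp [List.mem_map] at h
    obtain ⟨s, hs, hse⟩ := h
    exact ⟨s, hs, Or.inl hse.symm⟩
  · have hm : ∀ s ∈ safe_set, PySem.Str.lower s ≠ al := by
      simpa [PySem.Set.mem_ofList, List.mem_map, not_exists, not_and] using hmem
    rw [if_neg hmem, Bool.eq_iff_iff]
    by_cases hdash : PySem.Str.startswith al "-" = true
    · rw [if_pos hdash]
      simp only [List.any_eq_true, decide_eq_true_eq, PySem.Set.mem_ofList, List.mem_map,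
        hdash, Bool.true_and, beq_iff_eq, Bool.and_eq_true, Bool.or_eq_true]
      constructor
      · rintro ⟨len, hlen, s, hs, heq⟩
        rw [PySem.List.mem_pyRange_neg_one] at hlen
        have h0 : (0:Int) ≤ len := by omega
        have hto : PySem.Chars.lower s.toList = al.toList.take len.toNat := by
          have h := congrArg String.toList heq
          simp at h
          rwa [PySem.List.slice_to (hb := h0)] at h
        have hlen2 : len ≤ (al.toList.length : Int) - 1 := by
          have := hlen.2; simp [PySem.Str.len_eq, ← String.length_toList] at this ⊢; omega
        have hk := (pvPrefixLenIff al.toList (PySem.Chars.lower s.toList)).mp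
          ⟨len, hlen.1, hlen2, hto.symm⟩
        refine ⟨s, hs, Or.inr ⟨⟨?_, ?_⟩, ?_⟩⟩
        · simpa [PySem.Str.len_eq] using hk.1
        · have := hk.2.1; simp [PySem.Str.len_eq, ← String.length_toList] at this ⊢; omega
        · have := (PySem.Chars.startswith_iff _ _).mpr hk.2.2
          simpa using this
      · rintro ⟨s, hs, h⟩
        rcases h with heq | ⟨⟨h2, h3⟩, h4⟩
        · exact absurd heq.symm (hm s hs)
        · have hp : PySem.Chars.lower s.toList <+: al.toList := by
            have := h4; simp at this; exact (PySem.Chars.startswith_iff _ _).mp this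
          have h2' : 2 ≤ (PySem.Chars.lower s.toList).length := by
            simpa [PySem.Str.len_eq] using h2
          have h3' : (PySem.Chars.lower s.toList).length < al.toList.length := by
            simp [PySem.Str.len_eq, ← String.length_toList] at h3 ⊢; omega
          obtain ⟨len, hl1, hl2, hl3⟩ :=
            (pvPrefixLenIff al.toList (PySem.Chars.lower s.toList)).mpr ⟨h2', h3', hp⟩
          refine ⟨len, ?_, s, hs, ?_⟩
          · rw [PySem.List.mem_pyRange_neg_one]
            refine ⟨by omega, ?_⟩
            simp [PySem.Str.len_eq, ← String.length_toList]; omega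
          · apply String.toList_inj.mp
            simp
            rw [PySem.List.slice_to (hb := by omega)]
            exact hl3.symm
    · rw [if_neg hdash]
      simp only [List.any_eq_true, Bool.or_eq_true, beq_iff_eq, Bool.and_eq_true,
        decide_eq_true_eq]
      constructor
      · intro h; cases h
      · rintro ⟨s, hs, h⟩
        rcases h with heq | ⟨⟨⟨hd, _⟩, _⟩, _⟩
        · exact absurd heq.symm (hm s hs)
        · exact absurd hd hdash

-- ===== VERDICT (by name: the statement is the Claim_ definition above) =====
theorem matches_safe_subcommand_py_spec : Claim_equal_matches_safe_subcommand_py := by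
  intro arg safe_set _
  unfold Spec_matches_safe_subcommand_py
  exact pvMain arg safe_set
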